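-- pv_equiv track=rewrite | github.com/teyeong/Algorithm | 프로그래머스/2/12973. 짝지어 제거하기/짝지어 제거하기.py | solution
-- ===== SOURCE A (Python) =====
-- def solution(s):
--     list_s = []
--
--     for i in s:
--         list_s.append(i)
--         if len(list_s) > 1 and list_s[-2] == list_s[-1]:
--             list_s.pop()
--             list_s.pop()
--
--     if list_s:
--         return 0
--     else:
--         return 1
-- ===== SOURCE B (Python) =====
-- def solution(s):
--     cur = s
--     while True:
--         out = []
--         i = 0
--         n = len(cur)
--         while i < n:
--             if i + 1 < n and cur[i] == cur[i + 1]: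
--                 i += 2          # skip the pair; do NOT re-compare newly adjacent chars this pass
--             else:
--                 out.append(cur[i])
--                 i += 1
--         nxt = ''.join(out)
--         if len(nxt) == len(cur):
--             return 1 if cur == '' else 0
--         cur = nxt
-- ===== Notes on version B (the rewrite author's own statement) =====
-- stated objective: alternative
-- what changed: Replaces the single stack pass by repeated left-to-right non-merging scans that each delete the disjoint adjacent equal pairs found positionally, iterated until a pass removes nothing; returns 1 iff the fixpoint is empty.
import Mathlib
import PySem

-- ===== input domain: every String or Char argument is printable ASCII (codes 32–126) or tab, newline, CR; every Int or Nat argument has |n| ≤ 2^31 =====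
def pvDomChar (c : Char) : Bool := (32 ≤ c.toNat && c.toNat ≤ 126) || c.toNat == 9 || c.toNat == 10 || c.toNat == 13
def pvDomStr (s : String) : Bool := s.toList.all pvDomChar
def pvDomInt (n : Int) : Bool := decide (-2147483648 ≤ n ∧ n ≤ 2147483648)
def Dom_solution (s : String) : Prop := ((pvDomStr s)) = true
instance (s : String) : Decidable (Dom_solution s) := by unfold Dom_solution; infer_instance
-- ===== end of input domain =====

-- B replaces A's single stack pass by repeated positional scans, each deleting the disjoint
-- adjacent equal pairs it meets (never re-comparing newly adjacent characters within a pass),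
-- iterated to a fixpoint; objective: alternative algorithm, same return value.

-- ===== PORT A =====
-- list_s.append(i); if len(list_s) > 1 and list_s[-2] == list_s[-1]: pop; pop
def pvStepA (acc : List Char) (c : Char) : List Char :=
  let acc2 := acc ++ [c]
  if acc2.length > 1 ∧ PySem.List.pyGet? acc2 (-2) = PySem.List.pyGet? acc2 (-1)
  then acc2.dropLast.dropLast else acc2

def solution (s : String) : Int :=
  let list_s := s.toList.foldl pvStepA []
  if list_s ≠ [] then 0 else 1

-- ===== PORT B =====
-- one positional pass of Source B's inner index loop: emit cur[i] unless cur[i] == cur[i+1], then skip both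
def pvPass : List Char → List Char
  | [] => []
  | [a] => [a]
  | a :: b :: t => if a = b then pvPass t else a :: pvPass (b :: t)

-- needed by pvPasses's termination
theorem pvPass_length_le (l : List Char) : (pvPass l).length ≤ l.length := by
  induction l using pvPass.induct with
  | case1 => simp [pvPass]
  | case2 a => simp [pvPass]
  | case3 b t ih =>
    have hp : pvPass (b :: b :: t) = pvPass t := by simp [pvPass]
    rw [hp]; simp; omega
  | case4 a b t h ih => simp only [pvPass, if_neg h]; simpa using ih

-- outer while loop: repeat the pass until a pass changes nothing (length stable)
def pvPasses (l : List Char) : List Char :=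
  if (pvPass l).length = l.length then l else pvPasses (pvPass l)
termination_by l.length
decreasing_by
  have := pvPass_length_le l
  omega

def solution_alt (s : String) : Int :=
  if pvPasses s.toList = [] then 1 else 0

-- ===== PRECONDITION & SPEC =====
def Spec_solution (s : String) (out : Int) : Prop := out = solution_alt s
instance (s : String) (out : Int) : Decidable (Spec_solution s out) := by unfold Spec_solution; infer_instance

-- ===== CLAIM (what is proved, stated in full; the proofs are below) =====
def Claim_equal_solution : Prop := ∀ (s : String), Dom_solution s → Spec_solution s (solution s)

-- ===== LEMMAS AND PROOFS =====

-- A's stack viewed with the top in front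
def pvStep (st : List Char) (c : Char) : List Char :=
  match st with
  | [] => [c]
  | h :: t => if h = c then t else c :: h :: t

theorem pvStepA_rev (st : List Char) (c : Char) :
    pvStepA st.reverse c = (pvStep st c).reverse := by
  cases st with
  | nil => simp [pvStepA, pvStep]
  | cons h t =>
    rw [List.reverse_cons]
    have h1 : PySem.List.pyGet? (t.reverse ++ [h, c]) (-1) = some c := by
      simpa using PySem.List.pyGet?_neg_one_append_singleton (t.reverse ++ [h]) c
    have h2 : PySem.List.pyGet? (t.reverse ++ [h, c]) (-2) = some h := by
      have h2' : PySem.List.pyGet? ((t.reverse ++ [h]) ++ [c]) (-2) = some h := by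
        rw [PySem.List.pyGet?_neg_ofNat _ 2 (by omega) (by simp)]
        have hlen : ((t.reverse ++ [h]) ++ [c]).length - 2 = t.length := by simp
        rw [hlen, List.getElem?_append_left (by simp)]
        simp
      simpa using h2'
    by_cases hc : h = c
    · subst hc
      simp [pvStepA, pvStep, h1, h2]
    · simp [pvStepA, pvStep, h1, h2, hc]

theorem foldl_pvStepA_rev (l : List Char) : ∀ st : List Char,
    List.foldl pvStepA st.reverse l = (List.foldl pvStep st l).reverse := by
  induction l with
  | nil => intro st; rfl
  | cons c t ih =>
    intro st
    simp only [List.foldl_cons]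
    rw [pvStepA_rev, ih]

-- the stack never holds two equal adjacent characters
theorem pvStep_chain {st : List Char} (h : List.IsChain (fun a b => a ≠ b) st) (c : Char) :
    List.IsChain (fun a b => a ≠ b) (pvStep st c) := by
  cases st with
  | nil => simp [pvStep]
  | cons x t =>
    by_cases hx : x = c
    · simpa [pvStep, hx] using h.tail
    · simp only [pvStep, if_neg hx]
      exact List.isChain_cons_cons.mpr ⟨Ne.symm hx, h⟩

theorem pvStep_pair {st : List Char} (h : List.IsChain (fun a b => a ≠ b) st) (c : Char) :
    pvStep (pvStep st c) c = st := by
  cases st with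
  | nil => simp [pvStep]
  | cons x t =>
    by_cases hx : x = c
    · subst hx
      cases t with
      | nil => simp [pvStep]
      | cons y u =>
        have hy : x ≠ y := (List.isChain_cons_cons.mp h).1
        simp [pvStep, Ne.symm hy]
    · simp [pvStep, hx]

theorem foldl_pvStep_pvPass (l : List Char) : ∀ st : List Char,
    List.IsChain (fun a b => a ≠ b) st →
    List.foldl pvStep st (pvPass l) = List.foldl pvStep st l := by
  induction l using pvPass.induct with
  | case1 => intro st _; rfl
  | case2 a => intro st _; rfl
  | case3 b t ih =>
    intro st hst
    have hp : pvPass (b :: b :: t) = pvPass t := by simp [pvPass]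
    rw [hp, ih st hst]
    simp only [List.foldl_cons]
    rw [pvStep_pair hst]
  | case4 a b t h ih =>
    intro st hst
    simp only [pvPass, if_neg h, List.foldl_cons]
    exact ih (pvStep st a) (pvStep_chain hst a)

theorem foldl_pvStep_pvPasses (l : List Char) :
    List.foldl pvStep [] (pvPasses l) = List.foldl pvStep [] l := by
  induction l using pvPasses.induct with
  | case1 l h =>
    rw [pvPasses, if_pos h]
  | case2 l h ih =>
    rw [pvPasses, if_neg h]
    rw [ih, foldl_pvStep_pvPass l [] (by simp)]

theorem pvPass_eq_of_length (l : List Char) (h : (pvPass l).length = l.length) :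
    pvPass l = l := by
  induction l using pvPass.induct with
  | case1 => rfl
  | case2 a => rfl
  | case3 b t ih =>
    exfalso
    have h1 : pvPass (b :: b :: t) = pvPass t := by simp [pvPass]
    have := pvPass_length_le t
    rw [h1] at h
    simp at h
    omega
  | case4 a b t hne ih =>
    have h1 : pvPass (a :: b :: t) = a :: pvPass (b :: t) := by simp [pvPass, hne]
    rw [h1] at h ⊢
    simp at h
    rw [ih h]

theorem pvPasses_fix (l : List Char) : pvPass (pvPasses l) = pvPasses l := by
  induction l using pvPasses.induct with
  | case1 l h =>
    rw [pvPasses, if_pos h]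
    exact pvPass_eq_of_length l h
  | case2 l h ih =>
    rw [pvPasses, if_neg h]
    exact ih

theorem chain_of_pvPass_fix (l : List Char) (h : pvPass l = l) :
    List.IsChain (fun a b => a ≠ b) l := by
  induction l using pvPass.induct with
  | case1 => simp
  | case2 a => simp
  | case3 b t ih =>
    exfalso
    have h1 : pvPass (b :: b :: t) = pvPass t := by simp [pvPass]
    rw [h1] at h
    have := pvPass_length_le t
    have := congrArg List.length h
    simp at this
    omega
  | case4 a b t hne ih =>
    have h1 : pvPass (a :: b :: t) = a :: pvPass (b :: t) := by simp [pvPass, hne]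
    rw [h1] at h
    have h2 : pvPass (b :: t) = b :: t := by simpa using h
    exact List.isChain_cons_cons.mpr ⟨hne, ih h2⟩

theorem foldl_pvStep_of_chain (l : List Char) : ∀ st : List Char,
    List.IsChain (fun a b => a ≠ b) l →
    (∀ c, st.head? = some c → l.head? ≠ some c) →
    List.foldl pvStep st l = l.reverse ++ st := by
  induction l with
  | nil => intro st _ _; rfl
  | cons c t ih =>
    intro st hl hh
    have hstep : pvStep st c = c :: st := by
      cases st with
      | nil => rfl
      | cons x u =>
        have : x ≠ c := by
          intro hxc
          exact hh c (by simp [hxc]) (by simp)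
        simp [pvStep, this]
    simp only [List.foldl_cons, hstep]
    rw [ih (c :: st) hl.tail ?_]
    · simp
    · intro d hd ht
      cases t with
      | nil => simp at ht
      | cons y u =>
        simp at hd ht
        have hcy : c ≠ y := (List.isChain_cons_cons.mp hl).1
        exact hcy (hd.trans ht.symm)

theorem pv_main (l : List Char) : List.foldl pvStepA [] l = pvPasses l := by
  have h1 : List.foldl pvStepA [] l = (List.foldl pvStep [] l).reverse := by
    have := foldl_pvStepA_rev l []
    simpa using this
  have hchain := chain_of_pvPass_fix (pvPasses l) (pvPasses_fix l)
  have h3 : List.foldl pvStep [] (pvPasses l) = (pvPasses l).reverse ++ [] :=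
    foldl_pvStep_of_chain (pvPasses l) [] hchain (by intro c hc; simp at hc)
  rw [h1, ← foldl_pvStep_pvPasses, h3]
  simp

-- ===== VERDICT (by name: the statement is the Claim_ definition above) =====
theorem solution_spec : Claim_equal_solution := by
  intro s _
  unfold Spec_solution solution solution_alt
  rw [pv_main]
  by_cases h : pvPasses s.toList = [] <;> simp [h]
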